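-- pv_equiv track=rewrite | github.com/dio4/vista_1 | library/TNMS/Utils.py | convertTNMSDictToDigest
-- ===== SOURCE A (Python) =====
-- prefixes = ['c', 'p', 'r', 'y', 'yc', 'yp', 'a']
--
-- categories = ['T', 'N', 'M', 'M1Loc', 'S', 'G', 'L', 'V', 'Pn', 'R', 'St']
--
-- def showThisValue(d, prefix, param, value):
--     if value == '--':
--         return False
--     if param == 'M1Loc' and d.get(prefix + 'M', '--') != '1':
--         return False
--     if param == 'St' and value == '0' and (prefix not in ['c', 'p']):
--         show = False
--         for cat in categories:
--             if cat != 'St' and d.get(prefix + cat, '--') != '--':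
--                 if cat == 'M1Loc' and d.get(prefix + 'M', '--') != '1':
--                     continue
--                 show = True
--                 break
--         return show
--     return True
--
-- def convertTNMSDictToDigest(d):
--     parts = {}
--     for param in categories:
--         for prefix in prefixes:
--             key = prefix + param
--             value = d.get(key, '--')
--             if showThisValue(d, prefix, param, value):
--                 parts.setdefault(prefix, []).append(param + value)
--     return ' '.join('%s(%s)' % (param, ' '.join(parts[param])) if parts[param] else ''
--                     for param in sorted(parts.keys())
--                     )
-- ===== SOURCE B (Python) =====
-- prefixes = ['c', 'p', 'r', 'y', 'yc', 'yp', 'a']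
--
-- categories = ['T', 'N', 'M', 'M1Loc', 'S', 'G', 'L', 'V', 'Pn', 'R', 'St']
--
-- def _parse(key):
--     # unique split of a recognized key into (prefix, category):
--     # no category is a suffix of another, so at most one category matches
--     for cat in categories:
--         if key.endswith(cat) and key[:-len(cat)] in prefixes:
--             return key[:-len(cat)], cat
--     return None
--
-- def convertTNMSDictToDigest(d):
--     # 1) index the input once: keep only recognized 'prefix+category' keys
--     seen = {}
--     for key, value in d.items():
--         if _parse(key) is not None and key not in seen:
--             seen[key] = value
--
--     def get(k):
--         return seen.get(k, '--')
--
--     def visible(pfx, cat):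
--         v = get(pfx + cat)
--         return v != '--' and (cat != 'M1Loc' or get(pfx + 'M') == '1')
--
--     # 2) prefixes owning a visible non-St entry (drives the St=='0' suppression rule)
--     has = set()
--     for key in seen:
--         pfx, cat = _parse(key)
--         if cat != 'St' and visible(pfx, cat):
--             has.add(pfx)
--
--     # 3) emit the groups in sorted prefix order
--     groups = []
--     for pfx in sorted(prefixes):
--         items = [cat + get(pfx + cat) for cat in categories[:-1] if visible(pfx, cat)]
--         st = get(pfx + 'St')
--         if st != '--' and (st != '0' or pfx in ('c', 'p') or pfx in has):
--             items.append('St' + st)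
--         if items:
--             groups.append('%s(%s)' % (pfx, ' '.join(items)))
--     return ' '.join(groups)
-- ===== Notes on version B (the rewrite author's own statement) =====
-- stated objective: alternative
-- what changed: A probes the full prefix-by-category grid against the dict with d.get, its per-element show predicate rescanning all categories for every St entry; B never probes the grid against the input: it parses the input's keys once into an index of recognized 'prefix+category' entries, derives the set of prefixes owning a visible non-St entry from that index in one pass, and then emits the sorted groups with a single flat St decision per prefix.
import Mathlib
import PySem

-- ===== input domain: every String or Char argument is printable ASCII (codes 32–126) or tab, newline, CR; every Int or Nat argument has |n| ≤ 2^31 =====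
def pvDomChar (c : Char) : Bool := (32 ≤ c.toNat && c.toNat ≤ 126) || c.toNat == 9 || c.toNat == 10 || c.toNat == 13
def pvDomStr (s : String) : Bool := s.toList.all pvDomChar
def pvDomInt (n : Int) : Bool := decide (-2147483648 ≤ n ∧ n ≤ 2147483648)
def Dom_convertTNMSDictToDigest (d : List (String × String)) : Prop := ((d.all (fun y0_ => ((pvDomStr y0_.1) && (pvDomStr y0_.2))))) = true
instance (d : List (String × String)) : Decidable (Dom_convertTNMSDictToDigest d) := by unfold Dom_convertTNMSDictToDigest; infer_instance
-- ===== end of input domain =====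

-- B replaces A's grid of d.get probes (each St entry rescanning all categories) by a single
-- key-parsing pass that indexes the input once, a presence set derived from that index, and a
-- sorted emission pass; objective: alternative (different algorithm, similar cost).

-- ===== PORT A =====
def tnmPrefixes : List String := ["c", "p", "r", "y", "yc", "yp", "a"]

def tnmCategories : List String := ["T", "N", "M", "M1Loc", "S", "G", "L", "V", "Pn", "R", "St"]

-- d.get(k, '--'): first-match lookup on the association-list dict (shared language primitive).
def dgetTNM (d : List (String × String)) (k : String) : String :=
  (PySem.Dict.mk d).getD k "--"

def showThisValue (d : List (String × String)) (pfx param value : String) : Bool :=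
  if value == "--" then false
  else if param == "M1Loc" && dgetTNM d (pfx ++ "M") != "1" then false
  else if param == "St" && value == "0" && !(["c", "p"].contains pfx) then
    -- the for/break search for a shown non-St category
    tnmCategories.any (fun cat =>
      cat != "St" && dgetTNM d (pfx ++ cat) != "--" &&
        !(cat == "M1Loc" && dgetTNM d (pfx ++ "M") != "1"))
  else true

def convertTNMSDictToDigest (d : List (String × String)) : String :=
  let parts : PySem.Dict String (List String) :=
    tnmCategories.foldl (fun parts param =>
      tnmPrefixes.foldl (fun parts pfx =>
        let value := dgetTNM d (pfx ++ param)
        if showThisValue d pfx param value then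
          parts.modify pfx [] (fun l => l ++ [param ++ value])
        else parts) parts) PySem.Dict.empty
  PySem.Str.join " "
    ((PySem.List.sorted parts.keys (fun k => k)).map (fun p =>
      if !(parts.getD p []).isEmpty then
        p ++ "(" ++ PySem.Str.join " " (parts.getD p []) ++ ")"
      else ""))

-- ===== PORT B =====
-- _parse(key): the unique split of a recognized key into (prefix, category).
def tnmParse (key : String) : Option (String × String) :=
  tnmCategories.findSome? (fun cat =>
    if PySem.Str.endswith key cat &&
        tnmPrefixes.contains (PySem.Str.slice key none (some (-(PySem.Str.len cat)))) then
      some (PySem.Str.slice key none (some (-(PySem.Str.len cat))), cat)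
    else none)

-- step of B's first loop: index the input once, first occurrence of each recognized key wins
def tnmSeenStep (seen : PySem.Dict String String) (kv : String × String) :
    PySem.Dict String String :=
  if (tnmParse kv.1).isSome && !seen.contains kv.1 then seen.insert kv.1 kv.2 else seen

def tnmSeen (d : List (String × String)) : PySem.Dict String String :=
  d.foldl tnmSeenStep PySem.Dict.empty

-- get(k) = seen.get(k, '--')
def tnmGet (d : List (String × String)) (k : String) : String :=
  (tnmSeen d).getD k "--"

def tnmVisible (d : List (String × String)) (pfx cat : String) : Bool :=
  tnmGet d (pfx ++ cat) != "--" && (cat != "M1Loc" || tnmGet d (pfx ++ "M") == "1")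

-- step of B's second loop over seen: collect prefixes owning a visible non-St entry
-- (the 'none' branch is unreachable: every key stored in seen parses)
def tnmHasStep (d : List (String × String)) (has : PySem.Set String) (kv : String × String) :
    PySem.Set String :=
  match tnmParse kv.1 with
  | some (pfx, cat) => if cat != "St" && tnmVisible d pfx cat then PySem.Set.add has pfx else has
  | none => has

def tnmHas (d : List (String × String)) : PySem.Set String :=
  (tnmSeen d).items.foldl (tnmHasStep d) PySem.Set.empty

def convertTNMSDictToDigest_alt (d : List (String × String)) : String :=
  let groups : List String :=
    (PySem.List.sorted tnmPrefixes (fun p => p)).foldl (fun groups pfx =>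
      let items :=
        (tnmCategories.dropLast.filter (fun cat => tnmVisible d pfx cat)).map
          (fun cat => cat ++ tnmGet d (pfx ++ cat))
      let st := tnmGet d (pfx ++ "St")
      let items :=
        if st != "--" && (st != "0" || ["c", "p"].contains pfx || (tnmHas d).contains pfx) then
          items ++ ["St" ++ st]
        else items
      if !items.isEmpty then groups ++ [pfx ++ "(" ++ PySem.Str.join " " items ++ ")"] else groups)
      []
  PySem.Str.join " " groups

-- ===== PRECONDITION & SPEC =====
def Spec_convertTNMSDictToDigest (d : List (String × String)) (out : String) : Prop := out = convertTNMSDictToDigest_alt d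
instance (d : List (String × String)) (out : String) : Decidable (Spec_convertTNMSDictToDigest d out) := by unfold Spec_convertTNMSDictToDigest; infer_instance

-- ===== CLAIM (what is proved, stated in full; the proofs are below) =====
def Claim_equal_convertTNMSDictToDigest : Prop := ∀ (d : List (String × String)), Dom_convertTNMSDictToDigest d → Spec_convertTNMSDictToDigest d (convertTNMSDictToDigest d)

-- ===== LEMMAS AND PROOFS =====

-- names for B's per-prefix data (definitionally the body of B's emission fold)
def tnmNonStB (d : List (String × String)) (pfx : String) : List String :=
  (tnmCategories.dropLast.filter (fun cat => tnmVisible d pfx cat)).map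
    (fun cat => cat ++ tnmGet d (pfx ++ cat))

def tnmItemsB (d : List (String × String)) (pfx : String) : List String :=
  let st := tnmGet d (pfx ++ "St")
  if st != "--" && (st != "0" || ["c", "p"].contains pfx || (tnmHas d).contains pfx) then
    tnmNonStB d pfx ++ ["St" ++ st]
  else tnmNonStB d pfx

-- A-side per-prefix data in B's flattened form (proved equal to A below)
def tnmShowB (d : List (String × String)) (pfx param : String) : Bool :=
  dgetTNM d (pfx ++ param) != "--" && (param != "M1Loc" || dgetTNM d (pfx ++ "M") == "1")

def tnmNonSt (d : List (String × String)) (pfx : String) : List String :=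
  (tnmCategories.dropLast.filter (tnmShowB d pfx)).map
    (fun param => param ++ dgetTNM d (pfx ++ param))

def tnmItems (d : List (String × String)) (pfx : String) : List String :=
  let st := dgetTNM d (pfx ++ "St")
  if st != "--" && (st != "0" || ["c", "p"].contains pfx || !(tnmNonSt d pfx).isEmpty) then
    tnmNonSt d pfx ++ ["St" ++ st]
  else tnmNonSt d pfx

-- A's inner loop body and its dict, named.
def tnmStep (d : List (String × String)) (param : String)
    (parts : PySem.Dict String (List String)) (pfx : String) : PySem.Dict String (List String) :=
  if showThisValue d pfx param (dgetTNM d (pfx ++ param)) then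
    parts.modify pfx [] (fun l => l ++ [param ++ dgetTNM d (pfx ++ param)])
  else parts

def tnmParts (d : List (String × String)) : PySem.Dict String (List String) :=
  tnmCategories.foldl (fun parts param => tnmPrefixes.foldl (tnmStep d param) parts)
    PySem.Dict.empty

-- A's total contribution to key p, in loop order.
def tnmContrib (d : List (String × String)) (p : String) : List String :=
  tnmCategories.flatMap (fun param =>
    (tnmPrefixes.filter (fun pfx =>
        pfx == p && showThisValue d pfx param (dgetTNM d (pfx ++ param)))).map
      (fun pfx => param ++ dgetTNM d (pfx ++ param)))

-- tnmPrefixes, sorted, and the group filters over it.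
def tnmSortedP : List String := ["a", "c", "p", "r", "y", "yc", "yp"]

def tnmF (d : List (String × String)) : List String :=
  tnmSortedP.filter (fun p => !(tnmItems d p).isEmpty)

theorem list_isEmpty_filter {α : Type} (p : α → Bool) (l : List α) :
    (l.filter p).isEmpty = !(l.any p) := by
  induction l with
  | nil => rfl
  | cons x xs ih => by_cases h : p x <;> simp [h, ih]

theorem list_filter_map_eq_flatMap {α β : Type} (p : α → Bool) (f : α → β) (l : List α) :
    (l.filter p).map f = l.flatMap (fun x => if p x then [f x] else []) := by
  induction l with
  | nil => rfl
  | cons x xs ih => by_cases h : p x <;> simp [h, ih]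

theorem showA_plain (d : List (String × String)) (p param v : String)
    (hM : (param == "M1Loc") = false) (hSt : (param == "St") = false) :
    showThisValue d p param v = !(v == "--") := by
  simp [showThisValue, hM, hSt]
  cases h : v == "--" <;> simp_all

theorem showA_M1Loc (d : List (String × String)) (p v : String) :
    showThisValue d p "M1Loc" v = (!(v == "--") && (dgetTNM d (p ++ "M") == "1")) := by
  simp [showThisValue]
  cases h : v == "--" <;> cases h2 : dgetTNM d (p ++ "M") == "1" <;> simp_all

theorem anyA_eq (d : List (String × String)) (p : String) :
    (tnmCategories.any (fun cat =>
      cat != "St" && dgetTNM d (p ++ cat) != "--" &&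
        !(cat == "M1Loc" && dgetTNM d (p ++ "M") != "1"))) = !(tnmNonSt d p).isEmpty := by
  simp [tnmCategories, tnmNonSt, tnmShowB, list_isEmpty_filter, List.dropLast, bne, Bool.not_not]

theorem showA_St (d : List (String × String)) (p st : String) :
    showThisValue d p "St" st
      = (st != "--" && (st != "0" || ["c", "p"].contains p || !(tnmNonSt d p).isEmpty)) := by
  have h := anyA_eq d p
  simp only [showThisValue, h]
  cases h1 : st == "--" <;> cases h2 : st == "0" <;>
    cases h3 : ["c", "p"].contains p <;> cases h4 : (tnmNonSt d p).isEmpty <;> simp_all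

theorem tnmItems_eq (d : List (String × String)) (p : String) :
    tnmItems d p = tnmNonSt d p ++
      (if dgetTNM d (p ++ "St") != "--" &&
            (dgetTNM d (p ++ "St") != "0" || ["c", "p"].contains p || !(tnmNonSt d p).isEmpty)
       then ["St" ++ dgetTNM d (p ++ "St")] else []) := by
  rw [tnmItems]; split <;> simp_all

theorem getD_foldl_tnmStep (d : List (String × String)) (param : String) (L : List String) :
    ∀ (parts : PySem.Dict String (List String)) (p : String),
      (L.foldl (tnmStep d param) parts).getD p []
        = parts.getD p []
          ++ (L.filter (fun pfx =>
                pfx == p && showThisValue d pfx param (dgetTNM d (pfx ++ param)))).map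
              (fun pfx => param ++ dgetTNM d (pfx ++ param)) := by
  induction L with
  | nil => simp
  | cons pfx L ih =>
    intro parts p
    rw [List.foldl_cons, ih, List.filter_cons]
    unfold tnmStep
    by_cases hs : showThisValue d pfx param (dgetTNM d (pfx ++ param)) <;>
      by_cases hp : pfx = p
    · simp_all [PySem.Dict.getD_modify]
    · simp_all [PySem.Dict.getD_modify]
      exact fun h => hp h.symm
    · simp_all
    · simp_all

theorem getD_partsA (d : List (String × String)) (p : String) :
    (tnmParts d).getD p [] = tnmContrib d p := by
  rw [tnmParts, tnmContrib]
  have gen : ∀ (C : List String) (parts : PySem.Dict String (List String)),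
      (C.foldl (fun parts param => tnmPrefixes.foldl (tnmStep d param) parts) parts).getD p []
        = parts.getD p [] ++ C.flatMap (fun param =>
            (tnmPrefixes.filter (fun pfx =>
                pfx == p && showThisValue d pfx param (dgetTNM d (pfx ++ param)))).map
              (fun pfx => param ++ dgetTNM d (pfx ++ param))) := by
    intro C
    induction C with
    | nil => simp
    | cons c C ih =>
      intro parts
      rw [List.foldl_cons, ih, getD_foldl_tnmStep, List.flatMap_cons, List.append_assoc]
  rw [gen, PySem.Dict.getD_empty, List.nil_append]

theorem contrib_eq (d : List (String × String)) (p : String) (hp : p ∈ tnmPrefixes) :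
    tnmContrib d p = tnmItems d p := by
  simp only [tnmPrefixes, List.mem_cons, List.not_mem_nil, or_false] at hp
  rcases hp with rfl | rfl | rfl | rfl | rfl | rfl | rfl
  all_goals
    simp [tnmContrib, tnmItems_eq, tnmCategories, tnmPrefixes, tnmNonSt,
          list_filter_map_eq_flatMap, showA_plain, showA_M1Loc, showA_St, tnmShowB]
  all_goals (simp only [showA_St]; simp [tnmNonSt, tnmShowB, tnmCategories])

theorem contrib_nil (d : List (String × String)) (p : String) (hp : p ∉ tnmPrefixes) :
    tnmContrib d p = [] := by
  simp only [tnmPrefixes, List.mem_cons, List.not_mem_nil, or_false, not_or] at hp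
  obtain ⟨h1, h2, h3, h4, h5, h6, h7⟩ := hp
  simp [tnmContrib, tnmPrefixes, tnmCategories, Ne.symm h1, Ne.symm h2,
        Ne.symm h3, Ne.symm h4, Ne.symm h5, Ne.symm h6, Ne.symm h7]

theorem foldl_preserve {α σ : Type} (P : σ → Prop) (f : σ → α → σ) :
    ∀ (L : List α) (s : σ), (∀ s x, x ∈ L → P s → P (f s x)) → P s → P (L.foldl f s) := by
  intro L
  induction L with
  | nil => intro s _ h; simpa
  | cons x xs ih =>
    intro s hstep hs
    exact ih _ (fun s y hy => hstep s y (List.mem_cons_of_mem _ hy))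
      (hstep s x List.mem_cons_self hs)

def tnmInv (parts : PySem.Dict String (List String)) : Prop :=
  parts.keys.Nodup ∧ (∀ p, p ∈ parts.keys ↔ parts.getD p [] ≠ []) ∧
    (∀ p ∈ parts.keys, p ∈ tnmPrefixes)

theorem tnmStep_inv (d : List (String × String)) (param pfx : String)
    (hpfx : pfx ∈ tnmPrefixes) (parts : PySem.Dict String (List String))
    (h : tnmInv parts) : tnmInv (tnmStep d param parts pfx) := by
  obtain ⟨hnd, hmem, hsub⟩ := h
  rw [tnmStep]
  by_cases hs : showThisValue d pfx param (dgetTNM d (pfx ++ param))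
  · simp only [hs, if_pos]
    refine ⟨?_, ?_, ?_⟩
    · rw [PySem.Dict.keys_modify]
      exact PySem.Dict.nodup_keys_insert _ _ _ hnd
    · intro p
      rw [PySem.Dict.keys_modify, PySem.Dict.mem_keys_insert, PySem.Dict.getD_modify]
      by_cases hp : p = pfx <;> simp [hp, hmem]
    · intro p hp
      rw [PySem.Dict.keys_modify, PySem.Dict.mem_keys_insert] at hp
      rcases hp with rfl | hp
      · exact hpfx
      · exact hsub p hp
  · simpa [hs] using ⟨hnd, hmem, hsub⟩

theorem partsA_inv (d : List (String × String)) : tnmInv (tnmParts d) := by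
  rw [tnmParts]
  apply foldl_preserve
  · intro parts param _ h
    apply foldl_preserve
    · intro parts pfx hpfx h
      exact tnmStep_inv d param pfx hpfx parts h
    · exact h
  · refine ⟨?_, ?_, ?_⟩ <;> simp [PySem.Dict.keys_empty, PySem.Dict.getD_empty]

theorem mem_sortedP_iff (p : String) : p ∈ tnmSortedP ↔ p ∈ tnmPrefixes := by
  simp [tnmSortedP, tnmPrefixes]
  tauto

theorem mem_keysA_iff (d : List (String × String)) (p : String) :
    p ∈ (tnmParts d).keys ↔ p ∈ tnmSortedP ∧ (!(tnmItems d p).isEmpty) = true := by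
  obtain ⟨-, hmem, -⟩ := partsA_inv d
  rw [hmem, getD_partsA]
  by_cases hp : p ∈ tnmPrefixes
  · rw [contrib_eq d p hp]
    simp [mem_sortedP_iff, hp]
  · rw [contrib_nil d p hp]
    simp [mem_sortedP_iff, hp]

theorem A_unfold (d : List (String × String)) :
    convertTNMSDictToDigest d =
      PySem.Str.join " "
        ((PySem.List.sorted (tnmParts d).keys (fun k => k)).map (fun p =>
          if !((tnmParts d).getD p []).isEmpty then
            p ++ "(" ++ PySem.Str.join " " ((tnmParts d).getD p []) ++ ")"
          else "")) := rfl

theorem tnmSortedP_pairwise : tnmSortedP.Pairwise (fun a b => a < b) := by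
  simp [tnmSortedP, String.lt_iff_toList_lt]
  refine ⟨⟨?_,?_,?_,?_,?_,?_⟩,⟨?_,?_,?_,?_,?_⟩,⟨?_,?_,?_,?_⟩,⟨?_,?_,?_⟩,?_⟩ <;> decide

theorem sortedP_eq : PySem.List.sorted tnmPrefixes (fun p => p) = tnmSortedP :=
  PySem.List.sorted_eq_of_perm_of_pairwise_lt _ _ _ (by decide) tnmSortedP_pairwise

theorem A_eq (d : List (String × String)) :
    convertTNMSDictToDigest d =
      PySem.Str.join " "
        ((tnmF d).map (fun p => p ++ "(" ++ PySem.Str.join " " (tnmItems d p) ++ ")")) := by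
  rw [A_unfold]
  have hkeys : PySem.List.sorted (tnmParts d).keys (fun k => k) = tnmF d := by
    apply PySem.List.sorted_eq_of_perm_of_pairwise_lt
    · rw [tnmF, List.perm_ext_iff_of_nodup
        (List.Nodup.filter _ (by decide : tnmSortedP.Nodup)) (partsA_inv d).1]
      intro a
      rw [List.mem_filter, mem_keysA_iff]
    · exact List.Pairwise.filter _ tnmSortedP_pairwise
  rw [hkeys]
  apply congrArg
  apply List.map_congr_left
  intro a ha
  rw [tnmF, List.mem_filter] at ha
  obtain ⟨haS, hane⟩ := ha
  rw [getD_partsA, contrib_eq d a ((mem_sortedP_iff a).1 haS), hane, if_pos rfl]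

-- ===== B-side lemmas =====

-- seen agrees with d on every recognized key (first match on both sides)
theorem get?_foldl_seenStep (k : String) (hk : (tnmParse k).isSome) :
    ∀ (l : List (String × String)) (s : PySem.Dict String String),
      (l.foldl tnmSeenStep s).get? k = ((s.get? k).or ((PySem.Dict.mk l).get? k)) := by
  intro l
  induction l with
  | nil =>
    intro s
    cases hs : s.get? k <;>
      simp [hs, show (PySem.Dict.mk ([] : List (String × String))).get? k = none from rfl]
  | cons kv l ih =>
    intro s
    rw [List.foldl_cons, ih, PySem.Dict.get?_mk_cons]
    by_cases h : kv.1 = k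
    · subst h
      rw [tnmSeenStep]
      cases hs : s.get? kv.1 with
      | some w =>
        have : s.contains kv.1 = true := by
          rw [PySem.Dict.contains_eq_isSome_get?, hs]; rfl
        simp [this, hs]
      | none =>
        have : s.contains kv.1 = false := by
          rw [PySem.Dict.contains_eq_isSome_get?, hs]; rfl
        simp [this, hk, PySem.Dict.get?_insert_self]
    · have hb : (kv.1 == k) = false := by simp [h]
      have hstep : (tnmSeenStep s kv).get? k = s.get? k := by
        rw [tnmSeenStep]
        split
        · rw [PySem.Dict.get?_insert]
          rw [if_neg (fun hh => h hh.symm)]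
        · rfl
      rw [hstep, hb]
      simp

theorem tnmGet_eq_of_recognized (d : List (String × String)) (k : String)
    (hk : (tnmParse k).isSome) : tnmGet d k = dgetTNM d k := by
  rw [tnmGet, dgetTNM, PySem.Dict.getD_eq_get?_getD, PySem.Dict.getD_eq_get?_getD,
    tnmSeen, get?_foldl_seenStep k hk d PySem.Dict.empty, PySem.Dict.get?_empty, Option.none_or]

theorem tnmGet_eq (d : List (String × String)) (p c : String)
    (hp : p ∈ tnmPrefixes) (hc : c ∈ tnmCategories) :
    tnmGet d (p ++ c) = dgetTNM d (p ++ c) := by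
  apply tnmGet_eq_of_recognized
  fin_cases hp <;> fin_cases hc <;> decide

-- membership in the presence set, one step at a time
theorem mem_hasStep (d : List (String × String)) (s : PySem.Set String)
    (kv : String × String) (x : String) :
    x ∈ tnmHasStep d s kv ↔
      x ∈ s ∨ ∃ c, tnmParse kv.1 = some (x, c) ∧ c ≠ "St" ∧ tnmVisible d x c := by
  rw [tnmHasStep]
  cases hpa : tnmParse kv.1 with
  | none => simp
  | some pc =>
    obtain ⟨pfx, cat⟩ := pc
    show (x ∈ if (cat != "St" && tnmVisible d pfx cat) = true then s.add pfx else s) ↔ _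
    by_cases hcond : (cat != "St" && tnmVisible d pfx cat) = true
    · rw [if_pos hcond, PySem.Set.mem_add]
      simp only [Bool.and_eq_true, bne_iff_ne] at hcond
      constructor
      · rintro (h | rfl)
        · exact Or.inl h
        · exact Or.inr ⟨cat, rfl, hcond.1, hcond.2⟩
      · rintro (h | ⟨c, hc, _, _⟩)
        · exact Or.inl h
        · simp only [Option.some.injEq, Prod.mk.injEq] at hc
          obtain ⟨rfl, rfl⟩ := hc
          exact Or.inr rfl
    · rw [if_neg hcond]
      constructor
      · exact Or.inl
      · rintro (h | ⟨c, hc, hcSt, hvis⟩)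
        · exact h
        · simp only [Option.some.injEq, Prod.mk.injEq] at hc
          obtain ⟨rfl, rfl⟩ := hc
          exact absurd (by simp [hcSt, hvis]) hcond

theorem mem_foldl_hasStep (d : List (String × String)) (x : String) :
    ∀ (l : List (String × String)) (s : PySem.Set String),
      x ∈ l.foldl (tnmHasStep d) s ↔
        x ∈ s ∨ ∃ kv ∈ l, ∃ c, tnmParse kv.1 = some (x, c) ∧ c ≠ "St" ∧ tnmVisible d x c := by
  intro l
  induction l with
  | nil => simp
  | cons kv l ih =>
    intro s
    rw [List.foldl_cons, ih, mem_hasStep]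
    constructor
    · rintro ((h | ⟨c, hc⟩) | ⟨kv', hkv', hc⟩)
      · exact Or.inl h
      · exact Or.inr ⟨kv, List.mem_cons_self, c, hc⟩
      · exact Or.inr ⟨kv', List.mem_cons_of_mem _ hkv', hc⟩
    · rintro (h | ⟨kv', hkv', c, hc⟩)
      · exact Or.inl (Or.inl h)
      · rcases List.mem_cons.1 hkv' with rfl | hkv'
        · exact Or.inl (Or.inr ⟨c, hc⟩)
        · exact Or.inr ⟨kv', hkv', c, hc⟩

theorem mem_tnmHas (d : List (String × String)) (x : String) :
    x ∈ tnmHas d ↔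
      ∃ kv ∈ (tnmSeen d).items, ∃ c, tnmParse kv.1 = some (x, c) ∧ c ≠ "St" ∧
        tnmVisible d x c := by
  rw [tnmHas, mem_foldl_hasStep]
  simp [PySem.Set.empty]

theorem parse_cat_mem (k p c : String) (h : tnmParse k = some (p, c)) : c ∈ tnmCategories := by
  obtain ⟨cat, hmem, hcat⟩ := List.exists_of_findSome?_eq_some h
  split at hcat
  · cases hcat; exact hmem
  · cases hcat

-- 'p in has' decides exactly whether p owns a visible non-St entry
theorem tnmHas_iff (d : List (String × String)) (p : String) (hp : p ∈ tnmPrefixes) :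
    p ∈ tnmHas d ↔ tnmNonStB d p ≠ [] := by
  rw [mem_tnmHas, tnmNonStB]
  constructor
  · rintro ⟨kv, hkv, c, hpa, hcSt, hvis⟩
    have hc : c ∈ tnmCategories := parse_cat_mem kv.1 p c hpa
    have hcd : c ∈ tnmCategories.dropLast := by
      fin_cases hc <;> first | exact absurd rfl hcSt | decide
    intro hnil
    rw [List.map_eq_nil_iff, List.filter_eq_nil_iff] at hnil
    exact hnil c hcd hvis
  · intro hne
    have hfil : tnmCategories.dropLast.filter (fun cat => tnmVisible d p cat) ≠ [] := by
      intro h0; rw [h0] at hne; exact hne rfl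
    rw [ne_eq, List.filter_eq_nil_iff] at hfil
    push Not at hfil
    obtain ⟨c, hcd, hvis⟩ := hfil
    have hget : tnmGet d (p ++ c) ≠ "--" := by
      rw [tnmVisible, Bool.and_eq_true, bne_iff_ne] at hvis
      exact hvis.1
    obtain ⟨v, hv⟩ : ∃ v, (tnmSeen d).get? (p ++ c) = some v := by
      rcases h0 : (tnmSeen d).get? (p ++ c) with _ | v
      · exact absurd (by rw [tnmGet, PySem.Dict.getD_eq_get?_getD, h0]; rfl) hget
      · exact ⟨v, rfl⟩
    have hps : tnmParse (p ++ c) = some (p, c) := by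
      fin_cases hp <;> fin_cases hcd <;> decide
    have hcSt : c ≠ "St" := by fin_cases hcd <;> decide
    exact ⟨(p ++ c, v), PySem.Dict.mem_items_of_get?_eq_some _ hv, c, hps, hcSt, hvis⟩

-- B's per-prefix data equals A's
theorem itemsB_eq (d : List (String × String)) (p : String) (hp : p ∈ tnmPrefixes) :
    tnmItemsB d p = tnmItems d p := by
  have hM : tnmGet d (p ++ "M") = dgetTNM d (p ++ "M") := tnmGet_eq d p "M" hp (by decide)
  have hnonSt : tnmNonStB d p = tnmNonSt d p := by
    rw [tnmNonStB, tnmNonSt]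
    rw [List.filter_congr (fun c hc => ?_)]
    · apply List.map_congr_left
      intro c hc
      rw [List.mem_filter] at hc
      have hcC : c ∈ tnmCategories := List.dropLast_subset _ hc.1
      rw [tnmGet_eq d p c hp hcC]
    · have hcC : c ∈ tnmCategories := List.dropLast_subset _ hc
      rw [tnmVisible, tnmShowB, tnmGet_eq d p c hp hcC, hM]
  have hhas : (tnmHas d).contains p = !(tnmNonSt d p).isEmpty := by
    rcases h0 : (tnmNonSt d p).isEmpty with _ | _
    · rw [List.isEmpty_eq_false_iff] at h0
      simp only [Bool.not_false]
      rw [PySem.Set.contains_iff]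
      exact (tnmHas_iff d p hp).mpr (by rw [hnonSt]; exact h0)
    · rw [List.isEmpty_iff] at h0
      simp only [Bool.not_true]
      rcases h1 : (tnmHas d).contains p with _ | _
      · rfl
      · exact absurd (by rw [hnonSt]; exact h0)
          ((tnmHas_iff d p hp).mp (by rw [← PySem.Set.contains_iff]; exact h1))
  rw [tnmItemsB, tnmItems, tnmGet_eq d p "St" hp (by decide), hnonSt, hhas]

theorem B_unfold (d : List (String × String)) :
    convertTNMSDictToDigest_alt d =
      PySem.Str.join " "
        ((PySem.List.sorted tnmPrefixes (fun p => p)).foldl (fun out pfx =>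
          if !(tnmItemsB d pfx).isEmpty then
            out ++ [pfx ++ "(" ++ PySem.Str.join " " (tnmItemsB d pfx) ++ ")"]
          else out) []) := rfl

theorem B_eq (d : List (String × String)) :
    convertTNMSDictToDigest_alt d =
      PySem.Str.join " "
        ((tnmF d).map (fun p => p ++ "(" ++ PySem.Str.join " " (tnmItems d p) ++ ")")) := by
  rw [B_unfold, sortedP_eq, PySem.List.foldl_append_if
    (fun pfx => !(tnmItemsB d pfx).isEmpty)
    (fun pfx => pfx ++ "(" ++ PySem.Str.join " " (tnmItemsB d pfx) ++ ")"),
    List.nil_append, tnmF]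
  have hfil : tnmSortedP.filter (fun p => !(tnmItemsB d p).isEmpty)
      = tnmSortedP.filter (fun p => !(tnmItems d p).isEmpty) :=
    List.filter_congr (fun p hps => by
      rw [itemsB_eq d p ((mem_sortedP_iff p).1 hps)])
  rw [hfil]
  apply congrArg
  apply List.map_congr_left
  intro p hps
  rw [List.mem_filter] at hps
  rw [itemsB_eq d p ((mem_sortedP_iff p).1 hps.1)]

-- ===== VERDICT (by name: the statement is the Claim_ definition above) =====
theorem convertTNMSDictToDigest_spec : Claim_equal_convertTNMSDictToDigest := by
  intro d _
  unfold Spec_convertTNMSDictToDigest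
  rw [A_eq, B_eq]
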